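-- pv_equiv track=rewrite | github.com/axellbrendow/leetcode | python/lonely-pixel-i.py | count_black_pixels
-- ===== SOURCE A (Python) =====
-- def count_black_pixels(picture, nlines, ncolumns):
-- 	lines, columns = [0] * nlines, [0] * ncolumns
-- 	for i in range(nlines):
-- 		for j in range(ncolumns):
-- 			if picture[i][j] == 'B':
-- 				lines[i] += 1
-- 				columns[j] += 1
-- 	return lines, columns
-- ===== SOURCE B (Python) =====
-- def count_black_pixels(picture, nlines, ncolumns):
--     lines = [sum(1 for j in range(ncolumns) if picture[i][j] == 'B')
--              for i in range(nlines)]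
--     columns = [sum(1 for i in range(nlines) if picture[i][j] == 'B')
--                for j in range(ncolumns)]
--     return lines, columns
-- ===== Notes on version B (the rewrite author's own statement) =====
-- stated objective: simpler
-- what changed: Replaces the single combined nested loop that mutates two counter arrays with two independent comprehension passes: a row-major pass computing each row count and a separate column-major pass computing each column count.
import Mathlib
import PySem

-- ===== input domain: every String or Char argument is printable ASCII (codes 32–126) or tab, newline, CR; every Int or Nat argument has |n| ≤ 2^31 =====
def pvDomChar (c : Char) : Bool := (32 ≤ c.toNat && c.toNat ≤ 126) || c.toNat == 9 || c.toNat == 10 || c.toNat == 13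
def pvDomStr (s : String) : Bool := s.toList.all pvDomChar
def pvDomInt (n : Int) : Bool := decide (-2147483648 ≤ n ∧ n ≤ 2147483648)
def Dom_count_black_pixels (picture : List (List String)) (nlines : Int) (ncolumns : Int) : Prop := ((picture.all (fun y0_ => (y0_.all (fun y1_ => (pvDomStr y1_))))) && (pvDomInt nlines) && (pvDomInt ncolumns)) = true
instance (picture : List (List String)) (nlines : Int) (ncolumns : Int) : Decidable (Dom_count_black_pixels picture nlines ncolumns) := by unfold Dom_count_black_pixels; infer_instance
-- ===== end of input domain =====

-- B replaces A's single combined nested loop mutating two counter lists with two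
-- independent counting passes (row-major for row counts, column-major for column counts);
-- objective: simpler.

-- ===== PORT A =====
def count_black_pixels (picture : List (List String)) (nlines : Int) (ncolumns : Int) : List Int × List Int :=
  let init : List Int × List Int :=
    (List.replicate nlines.toNat (0 : Int), List.replicate ncolumns.toNat (0 : Int))
  (PySem.List.pyRange 0 nlines 1).foldl (fun st i =>
    (PySem.List.pyRange 0 ncolumns 1).foldl (fun st2 j =>
      if PySem.List.pyGetD (PySem.List.pyGetD picture i ([] : List String)) j "" = "B" then
        (PySem.List.pySetD st2.1 i (PySem.List.pyGetD st2.1 i 0 + 1),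
         PySem.List.pySetD st2.2 j (PySem.List.pyGetD st2.2 j 0 + 1))
      else st2) st) init

-- ===== PORT B =====
def count_black_pixels_alt (picture : List (List String)) (nlines : Int) (ncolumns : Int) : List Int × List Int :=
  ((PySem.List.pyRange 0 nlines 1).map (fun i =>
      ((PySem.List.pyRange 0 ncolumns 1).countP (fun j =>
        decide (PySem.List.pyGetD (PySem.List.pyGetD picture i ([] : List String)) j "" = "B")) : Int)),
   (PySem.List.pyRange 0 ncolumns 1).map (fun j =>
      ((PySem.List.pyRange 0 nlines 1).countP (fun i =>
        decide (PySem.List.pyGetD (PySem.List.pyGetD picture i ([] : List String)) j "" = "B")) : Int)))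

-- ===== PRECONDITION & SPEC =====
-- Pre_ excludes exactly the inputs where Python A raises IndexError: when both loop
-- bounds are positive, picture must have at least nlines rows and each of those rows
-- at least ncolumns entries.
def Pre_count_black_pixels (picture : List (List String)) (nlines : Int) (ncolumns : Int) : Prop :=
  0 < nlines → 0 < ncolumns →
    (nlines ≤ (picture.length : Int) ∧
      ∀ row ∈ picture.take nlines.toNat, ncolumns ≤ (row.length : Int))
instance (picture : List (List String)) (nlines : Int) (ncolumns : Int) : Decidable (Pre_count_black_pixels picture nlines ncolumns) := by unfold Pre_count_black_pixels; infer_instance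

def pvWitness_count_black_pixels : List (List String) × Int × Int :=
  ([["B", "W"], ["W", "B"], ["B", "B"]], 3, 2)

def Spec_count_black_pixels (picture : List (List String)) (nlines : Int) (ncolumns : Int) (out : List Int × List Int) : Prop := out = count_black_pixels_alt picture nlines ncolumns
instance (picture : List (List String)) (nlines : Int) (ncolumns : Int) (out : List Int × List Int) : Decidable (Spec_count_black_pixels picture nlines ncolumns out) := by unfold Spec_count_black_pixels; infer_instance

-- ===== CLAIM (what is proved, stated in full; the proofs are below) =====
def Claim_equal_count_black_pixels : Prop := ∀ (picture : List (List String)) (nlines : Int) (ncolumns : Int), Dom_count_black_pixels picture nlines ncolumns → Pre_count_black_pixels picture nlines ncolumns → Spec_count_black_pixels picture nlines ncolumns (count_black_pixels picture nlines ncolumns)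

-- ===== LEMMAS AND PROOFS =====

theorem pv_bump (st : List Int) (i : Int) (h : 0 ≤ i) :
    PySem.List.pySetD st i (PySem.List.pyGetD st i 0 + 1)
      = st.set i.toNat (st.getD i.toNat 0 + 1) := by
  rw [PySem.List.pySetD_of_nonneg _ _ h, PySem.List.pyGetD_of_nonneg _ _ h]

-- Inner loop of A (one fixed row index i, columns 0..m-1).
theorem pv_inner (picture : List (List String)) (i : Int) (hi0 : 0 ≤ i) (m : Nat)
    (L C : List Int) (hiL : i.toNat < L.length) :
    (PySem.List.pyRange 0 (m : Int) 1).foldl (fun st2 j =>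
        if PySem.List.pyGetD (PySem.List.pyGetD picture i ([] : List String)) j "" = "B" then
          (PySem.List.pySetD st2.1 i (PySem.List.pyGetD st2.1 i 0 + 1),
           PySem.List.pySetD st2.2 j (PySem.List.pyGetD st2.2 j 0 + 1))
        else st2) (L, C)
      = (L.set i.toNat (L[i.toNat] +
            ((PySem.List.pyRange 0 (m : Int) 1).countP (fun j =>
              decide (PySem.List.pyGetD (PySem.List.pyGetD picture i ([] : List String)) j "" = "B")) : Int)),
         (List.range C.length).map (fun q =>
            C.getD q 0 + (if (q : Int) < (m : Int) ∧
                PySem.List.pyGetD (PySem.List.pyGetD picture i ([] : List String)) (q : Int) "" = "B"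
              then (1 : Int) else 0))) := by
  induction m with
  | zero =>
    rw [PySem.List.pyRange_one_eq_nil (by omega)]
    simp only [List.foldl_nil]
    refine Prod.ext ?_ ?_
    · simp [List.set_getElem_self hiL]
    · apply List.ext_getElem
      · simp
      · intro q hq hq'
        simp only [List.length_map, List.length_range] at hq
        simp only [List.getElem_map, List.getElem_range]
        rw [if_neg (by rintro ⟨h1, _⟩; omega), List.getD_eq_getElem _ _ (by simpa using hq),
            add_zero]
  | succ m ih =>
    have hsplit : PySem.List.pyRange 0 ((m + 1 : Nat) : Int) 1
        = PySem.List.pyRange 0 (m : Int) 1 ++ [(m : Int)] := by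
      push_cast
      exact PySem.List.pyRange_one_succ_right (by omega)
    rw [hsplit, List.foldl_append, ih, List.foldl_cons, List.foldl_nil, List.countP_append,
        List.countP_singleton]
    by_cases hp : PySem.List.pyGetD (PySem.List.pyGetD picture i ([] : List String)) ((m : Nat) : Int) "" = "B"
    · have hd : decide (PySem.List.pyGetD (PySem.List.pyGetD picture i ([] : List String)) ((m : Nat) : Int) "" = "B") = true := by
        simp only [decide_eq_true_eq]; exact hp
      rw [if_pos hp]
      refine Prod.ext ?_ ?_
      · show PySem.List.pySetD _ i _ = _
        rw [pv_bump _ _ hi0]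
        rw [List.getD_eq_getElem _ _ (by simpa using hiL),
            List.getElem_set_self (by simpa using hiL), List.set_set]
        congr 1
        simp only [hd, if_true]
        push_cast
        ring
      · show PySem.List.pySetD _ ((m : Nat) : Int) _ = _
        rw [PySem.List.pySetD_natCast, PySem.List.pyGetD_natCast]
        apply List.ext_getElem
        · simp
        · intro q hq hq'
          simp only [List.length_set, List.length_map, List.length_range] at hq
          by_cases hqm : q = m
          · subst hqm
            rw [List.getElem_set_self (by simpa using hq)]
            rw [List.getD_eq_getElem _ _ (by simpa using hq)]
            simp only [List.getElem_map, List.getElem_range]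
            rw [if_neg (by rintro ⟨h1, _⟩; omega),
                if_pos ⟨by push_cast; omega, hp⟩]
            ring
          · rw [List.getElem_set_ne (by omega)]
            simp only [List.getElem_map, List.getElem_range]
            congr 1
            refine if_congr ?_ rfl rfl
            constructor <;> rintro ⟨h1, h2⟩ <;> exact ⟨by push_cast at h1 ⊢; omega, h2⟩
    · have hd : decide (PySem.List.pyGetD (PySem.List.pyGetD picture i ([] : List String)) ((m : Nat) : Int) "" = "B") = false := by
        simp only [decide_eq_false_iff_not]; exact hp
      rw [if_neg hp]
      refine Prod.ext ?_ ?_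
      · simp only [hd, Bool.false_eq_true, if_false, Nat.add_zero]
      · apply List.ext_getElem
        · simp
        · intro q hq hq'
          simp only [List.length_map, List.length_range] at hq
          simp only [List.getElem_map, List.getElem_range]
          congr 1
          refine if_congr ?_ rfl rfl
          constructor <;> rintro ⟨h1, h2⟩
          · exact ⟨by push_cast at h1 ⊢; omega, h2⟩
          · refine ⟨?_, h2⟩
            have hqm : q ≠ m := by rintro rfl; exact hp h2
            push_cast at h1 ⊢
            omega

-- Outer loop of A after processing rows 0..n-1 (n ≤ N), from the zeroed state.
theorem pv_outer (picture : List (List String)) (N M n : Nat) (hn : n ≤ N) :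
    (PySem.List.pyRange 0 (n : Int) 1).foldl (fun st i =>
        (PySem.List.pyRange 0 (M : Int) 1).foldl (fun st2 j =>
          if PySem.List.pyGetD (PySem.List.pyGetD picture i ([] : List String)) j "" = "B" then
            (PySem.List.pySetD st2.1 i (PySem.List.pyGetD st2.1 i 0 + 1),
             PySem.List.pySetD st2.2 j (PySem.List.pyGetD st2.2 j 0 + 1))
          else st2) st)
      (List.replicate N (0 : Int), List.replicate M (0 : Int))
      = ((List.range N).map (fun r =>
            if r < n then
              ((PySem.List.pyRange 0 (M : Int) 1).countP (fun j =>
                decide (PySem.List.pyGetD (PySem.List.pyGetD picture (r : Int) ([] : List String)) j "" = "B")) : Int)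
            else 0),
         (List.range M).map (fun (q : Nat) =>
            ((PySem.List.pyRange 0 (n : Int) 1).countP (fun i =>
              decide (PySem.List.pyGetD (PySem.List.pyGetD picture i ([] : List String)) (q : Int) "" = "B")) : Int))) := by
  induction n with
  | zero =>
    rw [show PySem.List.pyRange 0 ((0 : Nat) : Int) 1 = [] from
          PySem.List.pyRange_one_eq_nil (by omega)]
    refine Prod.ext ?_ ?_
    · apply List.ext_getElem
      · simp
      · intro r hr hr'
        simp
    · apply List.ext_getElem
      · simp
      · intro q hq hq'
        simp
  | succ n ih =>
    have hsplit : PySem.List.pyRange 0 ((n + 1 : Nat) : Int) 1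
        = PySem.List.pyRange 0 (n : Int) 1 ++ [(n : Int)] := by
      push_cast
      exact PySem.List.pyRange_one_succ_right (by omega)
    rw [hsplit, List.foldl_append, ih (by omega), List.foldl_cons, List.foldl_nil]
    rw [pv_inner picture (n : Int) (by omega) M _ _ (by simp only [Int.toNat_natCast, List.length_map, List.length_range]; omega)]
    simp only [Int.toNat_natCast]
    refine Prod.ext ?_ ?_
    · apply List.ext_getElem
      · simp
      · intro r hr hr'
        simp only [List.length_set, List.length_map, List.length_range] at hr
        by_cases hrn : r = n
        · subst hrn
          rw [List.getElem_set_self (by simpa using hr)]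
          simp only [List.getElem_map, List.getElem_range]
          rw [if_neg (by omega), if_pos (by omega)]
          ring
        · rw [List.getElem_set_ne (by omega)]
          simp only [List.getElem_map, List.getElem_range]
          by_cases hlt : r < n
          · rw [if_pos hlt, if_pos (by omega)]
          · rw [if_neg hlt, if_neg (by omega)]
    · apply List.ext_getElem
      · simp
      · intro q hq hq'
        simp only [List.length_map, List.length_range] at hq
        simp only [List.getElem_map, List.getElem_range]
        rw [List.getD_eq_getElem _ _ (by simpa using hq)]
        simp only [List.getElem_map, List.getElem_range]
        rw [List.countP_append, List.countP_singleton]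
        by_cases hp : PySem.List.pyGetD (PySem.List.pyGetD picture ((n : Nat) : Int) ([] : List String)) ((q : Nat) : Int) "" = "B"
        · have hd : decide (PySem.List.pyGetD (PySem.List.pyGetD picture ((n : Nat) : Int) ([] : List String)) ((q : Nat) : Int) "" = "B") = true := by
            simp only [decide_eq_true_eq]; exact hp
          rw [if_pos ⟨by push_cast; omega, hp⟩]
          simp only [hd, if_true]
          push_cast
          ring
        · have hd : decide (PySem.List.pyGetD (PySem.List.pyGetD picture ((n : Nat) : Int) ([] : List String)) ((q : Nat) : Int) "" = "B") = false := by
            simp only [decide_eq_false_iff_not]; exact hp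
          rw [if_neg (by rintro ⟨h1, h2⟩; exact hp h2)]
          simp only [hd, Bool.false_eq_true, if_false, Nat.add_zero]
          push_cast
          ring

theorem pv_range_toNat (n : Int) :
    PySem.List.pyRange 0 n 1 = PySem.List.pyRange 0 (n.toNat : Int) 1 := by
  by_cases h : 0 ≤ n
  · rw [Int.toNat_of_nonneg h]
  · rw [PySem.List.pyRange_one_eq_nil (by omega),
        PySem.List.pyRange_one_eq_nil (by omega)]

-- ===== VERDICT (by name: the statement is the Claim_ definition above) =====
theorem count_black_pixels_spec : Claim_equal_count_black_pixels := by
  intro picture nlines ncolumns _ _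
  unfold Spec_count_black_pixels count_black_pixels count_black_pixels_alt
  rw [pv_range_toNat nlines, pv_range_toNat ncolumns]
  rw [pv_outer picture nlines.toNat ncolumns.toNat nlines.toNat (le_refl _)]
  refine Prod.ext ?_ ?_
  · rw [PySem.List.pyRange_one (0 : Int) (nlines.toNat : Int), List.map_map]
    apply List.ext_getElem
    · simp
      omega
    · intro r hr hr'
      simp only [List.length_map, List.length_range] at hr
      simp only [List.getElem_map, List.getElem_range, Function.comp]
      rw [if_pos (by simpa using hr)]
      norm_num
  · rw [PySem.List.pyRange_one (0 : Int) (ncolumns.toNat : Int), List.map_map]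
    apply List.ext_getElem
    · simp
      omega
    · intro q hq hq'
      simp only [List.getElem_map, List.getElem_range, Function.comp]
      norm_num
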